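-- pv_equiv track=rewrite | github.com/aleppomh/trading | improved_chart_analyzer.py | count_consecutive_candles
-- ===== SOURCE A (Python) =====
-- def count_consecutive_candles(candle_colors, direction):
--     """
--     حساب عدد الشموع المتتالية بنفس الاتجاه
--     """
--     count = 0
--     # البدء من آخر شمعة والعودة للخلف
--     for i in range(len(candle_colors)-1, -1, -1):
--         if candle_colors[i] == direction:
--             count += 1
--         else:
--             break
--     return count
-- ===== SOURCE B (Python) =====
-- def count_consecutive_candles(candle_colors, direction):
--     count = 0
--     for color in candle_colors:
--         if color == direction:
--             count += 1
--         else: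
--             count = 0
--     return count
-- ===== Notes on version B (the rewrite author's own statement) =====
-- stated objective: alternative
-- what changed: Replaces the reverse index loop with early break by a single front-to-back pass maintaining a resettable run counter; the final counter equals the trailing run length.
import Mathlib
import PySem

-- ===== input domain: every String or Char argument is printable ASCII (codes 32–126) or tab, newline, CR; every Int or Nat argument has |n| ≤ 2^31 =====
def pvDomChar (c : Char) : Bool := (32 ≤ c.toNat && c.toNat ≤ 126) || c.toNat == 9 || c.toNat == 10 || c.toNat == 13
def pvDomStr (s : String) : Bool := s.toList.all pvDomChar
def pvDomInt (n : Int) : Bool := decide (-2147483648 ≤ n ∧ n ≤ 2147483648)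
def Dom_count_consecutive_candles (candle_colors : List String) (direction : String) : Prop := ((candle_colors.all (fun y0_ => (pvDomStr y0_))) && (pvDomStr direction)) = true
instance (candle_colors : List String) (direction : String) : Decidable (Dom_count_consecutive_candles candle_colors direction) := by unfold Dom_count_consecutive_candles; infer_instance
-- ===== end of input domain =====

-- B replaces A's reverse index loop with break by a full forward pass with a resettable run counter (alternative decomposition, same result; not faster).


-- ===== PORT A =====
-- A: iterate i from len-1 down to 0, counting while candle_colors[i] == direction, break on mismatch.
def pvAwhile (direction : String) : List String → Int
  | [] => 0
  | c :: rest => if c == direction then pvAwhile direction rest + 1 else 0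

def count_consecutive_candles (candle_colors : List String) (direction : String) : Int :=
  pvAwhile direction candle_colors.reverse

-- ===== PORT B =====
-- B: one forward pass, counter incremented on match and reset to 0 on mismatch.
def count_consecutive_candles_alt (candle_colors : List String) (direction : String) : Int :=
  candle_colors.foldl (fun count color => if color == direction then count + 1 else 0) 0

-- ===== PRECONDITION & SPEC =====
def Spec_count_consecutive_candles (candle_colors : List String) (direction : String) (out : Int) : Prop := out = count_consecutive_candles_alt candle_colors direction
instance (candle_colors : List String) (direction : String) (out : Int) : Decidable (Spec_count_consecutive_candles candle_colors direction out) := by unfold Spec_count_consecutive_candles; infer_instance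

-- ===== CLAIM (what is proved, stated in full; the proofs are below) =====
def Claim_equal_count_consecutive_candles : Prop := ∀ (candle_colors : List String) (direction : String), Dom_count_consecutive_candles candle_colors direction → Spec_count_consecutive_candles candle_colors direction (count_consecutive_candles candle_colors direction)

-- ===== LEMMAS AND PROOFS =====

-- ===== VERDICT (by name: the statement is the Claim_ definition above) =====
theorem pvAwhile_append (direction : String) (ys : List String) (c : String) :
    pvAwhile direction (ys ++ [c])
      = pvAwhile direction ys +
        (if ys.all (fun x => x == direction) then (if c == direction then 1 else 0) else 0) := by
  induction ys with
  | nil => by_cases h : c == direction <;> simp [pvAwhile, h]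
  | cons y ys ih =>
      by_cases hy : y == direction <;> simp [pvAwhile, hy, ih] <;> split_ifs <;> ring

theorem pvFoldl_reset (direction : String) (xs : List String) (acc : Int) :
    xs.foldl (fun count color => if color == direction then count + 1 else 0) acc
      = pvAwhile direction xs.reverse +
        (if xs.all (fun c => c == direction) then acc else 0) := by
  induction xs generalizing acc with
  | nil => simp [pvAwhile]
  | cons c rest ih =>
      simp only [List.foldl_cons, List.reverse_cons, List.all_cons, pvAwhile_append, ih]
      by_cases h : c == direction <;>
        simp [h, List.all_eq_true, List.mem_reverse] <;> split_ifs <;> simp_all <;> ring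

theorem count_consecutive_candles_spec : Claim_equal_count_consecutive_candles := by
  intro candle_colors direction _
  unfold Spec_count_consecutive_candles count_consecutive_candles count_consecutive_candles_alt
  rw [pvFoldl_reset direction candle_colors 0]
  simp
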